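-- pv_equiv track=rewrite | github.com/vv137/NextFold | src/nextfold/data/parsers.py | parse_a3m
-- ===== SOURCE A (Python) =====
-- import string
-- from typing import Iterable, Sequence
--
-- DeletionMatrix = Sequence[Sequence[int]]
--
-- def parse_fasta(
--     fasta_string: str,
-- ) -> tuple[Sequence[str], Sequence[str]]:
--     """Parses FASTA string and returns list of strings with amino-acid
--     sequences.
--
--     Args:
--         fasta_string (str): The string contents of a FASTA file.
--
--     Returns:
--         tuple[Sequence[str], Sequence[str]]:
--         A tuple of:
--             - A list of sequence.
--             - A list of descriptions.
--
--     """
--     sequences = []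
--     descriptions = []
--     index = -1
--     for line in fasta_string.splitlines():
--         line = line.strip()
--         if line.startswith(">"):
--             index += 1
--             descriptions.append(line[1:])
--             sequences.append("")
--             continue
--         elif line.startswith("#"):
--             continue
--         elif not line:
--             continue  # Skip blank lines.
--         sequences[index] += line
--     return sequences, descriptions
--
-- def parse_a3m(
--     a3m_string: str,
-- ) -> tuple[Sequence[str], DeletionMatrix, Sequence[str]]:
--     """Parses sequences and deletion matrix from a3m format alignment.
--
--     Args:
--         a3m_string (str):
--             The string contents of a a3m file.
--             The first sequence in the file should be the query sequence.
--
--     Returns: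
--         tuple[Sequence[str], DeletionMatrix, Sequence[str]]:
--         A tuple of:
--             - A list of sequences that have been aligned to the query.
--                 These might contain duplicates.
--             - The deletion matrix for the alignment as a list of lists.
--                 The element at `deletion_matrix[i][j]` is the number of
--                 residues deleted from the aligned sequence `i` at residue
--                 position `j`.
--             - A list of descriptions.
--     """
--     sequences, descriptions = parse_fasta(a3m_string)
--     deletion_matrix = []
--     for msa_sequence in sequences:
--         deletion_vec = []
--         deletion_count = 0
--         for j in msa_sequence:
--             if j.islower():
--                 deletion_count += 1
--             else:
--                 deletion_vec.append(deletion_count)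
--                 deletion_count = 0
--         deletion_matrix.append(deletion_vec)
--
--     # Make the MSA matrix out of aligned (deletion-free) sequences.
--     deletion_table = str.maketrans("", "", string.ascii_lowercase)
--     aligned_sequences = [s.translate(deletion_table) for s in sequences]
--     return aligned_sequences, deletion_matrix, descriptions
-- ===== SOURCE B (Python) =====
-- def parse_a3m(a3m_string):
--     """Single pass over the a3m lines: builds descriptions, the aligned
--     (deletion-free) sequences and the deletion matrix at once, instead of
--     first assembling raw sequences and then post-processing them twice."""
--     descriptions = []
--     aligned = []  # per sequence: list of aligned (non-lowercase) characters
--     matrix = []   # per sequence: deletion vector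
--     count = 0
--     for raw in a3m_string.splitlines():
--         line = raw.strip()
--         if line.startswith(">"):
--             descriptions.append(line[1:])
--             aligned.append([])
--             matrix.append([])
--             count = 0
--         elif line.startswith("#") or not line:
--             continue
--         else:
--             chars = aligned[-1]
--             vec = matrix[-1]
--             for ch in line:
--                 if ch.islower():
--                     count += 1
--                 else:
--                     chars.append(ch)
--                     vec.append(count)
--                     count = 0
--     return ["".join(c) for c in aligned], matrix, descriptions
-- ===== Notes on version B (the rewrite author's own statement) =====
-- stated objective: alternative
-- what changed: Replaces A's three-phase structure (parse_fasta assembling raw sequences, then a per-sequence deletion-count loop, then a str.translate stripping pass) with one streaming pass over the lines that builds descriptions, deletion vectors and aligned sequences simultaneously, never materialising the raw sequences.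
import Mathlib
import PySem

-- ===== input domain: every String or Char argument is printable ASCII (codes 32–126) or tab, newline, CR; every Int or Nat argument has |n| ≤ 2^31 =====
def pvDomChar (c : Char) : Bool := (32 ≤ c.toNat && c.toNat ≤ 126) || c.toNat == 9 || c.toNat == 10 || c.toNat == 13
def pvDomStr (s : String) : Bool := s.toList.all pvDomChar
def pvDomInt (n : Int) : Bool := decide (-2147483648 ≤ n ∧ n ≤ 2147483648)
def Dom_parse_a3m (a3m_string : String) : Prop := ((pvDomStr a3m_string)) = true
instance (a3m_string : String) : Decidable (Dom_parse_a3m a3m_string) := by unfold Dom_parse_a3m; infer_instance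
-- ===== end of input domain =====

-- B fuses A's three phases (raw-sequence assembly, deletion-count pass, lowercase-stripping pass)
-- into one streaming pass over the lines; ports agree on every input where A returns (Pre_ excludes
-- the IndexError raised when a sequence line precedes the first header line).


-- ===== PORT A =====
-- deletion-count loop body of A: j.islower() counts, otherwise flush the count
def aDel (p : List Int × Int) (c : Char) : List Int × Int :=
  if PySem.Chars.islower c then (p.1, p.2 + 1) else (p.1 ++ [p.2], 0)

-- loop body of parse_fasta; state = (sequences, descriptions, index); none = IndexError raised
def aFastaStep (st : Option (List (List Char) × List (List Char) × Int)) (raw : List Char) :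
    Option (List (List Char) × List (List Char) × Int) :=
  match st with
  | none => none
  | some (seqs, descs, index) =>
    let line := PySem.Chars.strip raw
    if PySem.Chars.startswith line ['>'] then
      some (seqs ++ [[]], descs ++ [PySem.List.slice line (some 1) none], index + 1)
    else if PySem.Chars.startswith line ['#'] then some (seqs, descs, index)
    else if line.isEmpty then some (seqs, descs, index)
    else
      match PySem.List.pyGet? seqs index with          -- sequences[index] (negative-index rules)
      | none => none                                   -- IndexError
      | some s => some (PySem.List.pySetD seqs index (s ++ line), descs, index)

def parse_fasta_chars (s : List Char) : Option (List (List Char) × List (List Char)) :=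
  match (PySem.Chars.splitlines s).foldl aFastaStep (some ([], [], (-1 : Int))) with
  | none => none
  | some (seqs, descs, _) => some (seqs, descs)

def parse_a3m (a3m_string : String) : List String × List (List Int) × List String :=
  match parse_fasta_chars a3m_string.toList with
  | none => ([], [], [])        -- unreachable under Pre_parse_a3m (Python raises IndexError here)
  | some (seqs, descs) =>
    let deletion_matrix := seqs.map (fun s => (s.foldl aDel ([], 0)).1)
    -- s.translate(deletion_table) deletes exactly string.ascii_lowercase, i.e. 'a' ≤ c ≤ 'z'
    let aligned := seqs.map (fun s => s.filter (fun c => !(decide ('a' ≤ c) && decide (c ≤ 'z'))))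
    (aligned.map String.ofList, deletion_matrix, descs.map String.ofList)

-- ===== PORT B =====
-- inner character loop of B: state = (chars of aligned[-1], vec of matrix[-1], count)
def bChar (st : List Char × List Int × Int) (c : Char) : List Char × List Int × Int :=
  if PySem.Chars.islower c then (st.1, st.2.1, st.2.2 + 1)
  else (st.1 ++ [c], st.2.1 ++ [st.2.2], 0)

-- line loop of B: state = (descriptions, aligned, matrix, count); none = IndexError on aligned[-1]
def bLineStep (st : Option (List (List Char) × List (List Char) × List (List Int) × Int))
    (raw : List Char) : Option (List (List Char) × List (List Char) × List (List Int) × Int) :=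
  match st with
  | none => none
  | some (descs, al, dm, cnt) =>
    let line := PySem.Chars.strip raw
    if PySem.Chars.startswith line ['>'] then
      some (descs ++ [PySem.List.slice line (some 1) none], al ++ [[]], dm ++ [[]], 0)
    else if PySem.Chars.startswith line ['#'] || line.isEmpty then
      some (descs, al, dm, cnt)
    else
      match PySem.List.pyGet? al (-1), PySem.List.pyGet? dm (-1) with
      | some chars, some vec =>
        let r := line.foldl bChar (chars, vec, cnt)
        some (descs, PySem.List.pySetD al (-1) r.1, PySem.List.pySetD dm (-1) r.2.1, r.2.2)
      | _, _ => none                                   -- IndexError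

def parse_a3m_alt (a3m_string : String) : List String × List (List Int) × List String :=
  match (PySem.Chars.splitlines a3m_string.toList).foldl bLineStep (some ([], [], [], 0)) with
  | none => ([], [], [])        -- unreachable under Pre_parse_a3m
  | some (descs, al, dm, _) => (al.map String.ofList, dm, descs.map String.ofList)

-- ===== PRECONDITION & SPEC =====
-- Pre_ excludes exactly the inputs where Python A raises IndexError: a stripped sequence line
-- (non-blank, not a comment line, not a header line) occurring before the first header line.
def Pre_parse_a3m (a3m_string : String) : Prop :=
  ∀ l ∈ ((PySem.Chars.splitlines a3m_string.toList).filter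
      (fun l => let t := PySem.Chars.strip l
                !(PySem.Chars.startswith t ['#'] || t.isEmpty))).take 1,
    PySem.Chars.startswith (PySem.Chars.strip l) ['>'] = true
instance (a3m_string : String) : Decidable (Pre_parse_a3m a3m_string) := by
  unfold Pre_parse_a3m; infer_instance

def pvWitness_parse_a3m : String := ">q desc\nAbC\n>s\n-aX\n"

def Spec_parse_a3m (a3m_string : String) (out : List String × List (List Int) × List String) : Prop := out = parse_a3m_alt a3m_string
instance (a3m_string : String) (out : List String × List (List Int) × List String) : Decidable (Spec_parse_a3m a3m_string out) := by unfold Spec_parse_a3m; infer_instance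

-- ===== CLAIM (what is proved, stated in full; the proofs are below) =====
def Claim_equal_parse_a3m : Prop := ∀ (a3m_string : String), Dom_parse_a3m a3m_string → Pre_parse_a3m a3m_string → Spec_parse_a3m a3m_string (parse_a3m a3m_string)

-- ===== LEMMAS AND PROOFS =====

-- A's stripping predicate (ascii_lowercase membership) as a function
def alF (s : List Char) : List Char := s.filter (fun c => !PySem.Chars.islower c)
-- A's final deletion vector of a sequence, and the pending count
def vecF (s : List Char) : List Int := (s.foldl aDel ([], 0)).1
def cntF (s : List Char) : Int := (s.foldl aDel ([], 0)).2
-- the pending count B carries for the sequence currently being extended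
def cntLast (seqs : List (List Char)) : Int :=
  match seqs.getLast? with
  | none => 0
  | some t => cntF t

-- B's state as a function of A's state
def mirror : Option (List (List Char) × List (List Char) × Int) →
    Option (List (List Char) × List (List Char) × List (List Int) × Int)
  | none => none
  | some (seqs, descs, _) => some (descs, seqs.map alF, seqs.map vecF, cntLast seqs)

theorem aDel_pref (l : List Char) : ∀ (v : List Int) (c : Int),
    l.foldl aDel (v, c) = (v ++ (l.foldl aDel ([], c)).1, (l.foldl aDel ([], c)).2) := by
  induction l with
  | nil => intro v c; simp
  | cons x l ih =>
    intro v c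
    by_cases h : PySem.Chars.islower x = true
    · have ha : aDel (v, c) x = (v, c + 1) := by simp [aDel, h]
      have ha0 : aDel (([] : List Int), c) x = ([], c + 1) := by simp [aDel, h]
      rw [List.foldl_cons, List.foldl_cons, ha, ha0]
      exact ih v (c + 1)
    · have ha : aDel (v, c) x = (v ++ [c], 0) := by simp [aDel, h]
      have ha0 : aDel (([] : List Int), c) x = ([c], 0) := by simp [aDel, h]
      rw [List.foldl_cons, List.foldl_cons, ha, ha0, ih (v ++ [c]) 0, ih [c] 0]
      simp

theorem bChar_fuse (l : List Char) : ∀ (a : List Char) (v : List Int) (c : Int),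
    l.foldl bChar (a, v, c) =
      (a ++ alF l, v ++ (l.foldl aDel ([], c)).1, (l.foldl aDel ([], c)).2) := by
  induction l with
  | nil => intro a v c; simp [alF]
  | cons x l ih =>
    intro a v c
    by_cases h : PySem.Chars.islower x = true
    · have hb : bChar (a, v, c) x = (a, v, c + 1) := by simp [bChar, h]
      have ha0 : aDel (([] : List Int), c) x = ([], c + 1) := by simp [aDel, h]
      rw [List.foldl_cons, List.foldl_cons, hb, ha0, ih a v (c + 1)]
      simp [alF, h]
    · have hb : bChar (a, v, c) x = (a ++ [x], v ++ [c], 0) := by simp [bChar, h]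
      have ha0 : aDel (([] : List Int), c) x = ([c], 0) := by simp [aDel, h]
      rw [List.foldl_cons, List.foldl_cons, hb, ha0, ih (a ++ [x]) (v ++ [c]) 0,
        aDel_pref l [c] 0]
      simp [alF, h]

-- the full deletion pass over t ++ l picks up after the pass over t
theorem vecF_cntF_append (t l : List Char) :
    vecF (t ++ l) = vecF t ++ (l.foldl aDel ([], cntF t)).1 ∧
      cntF (t ++ l) = (l.foldl aDel ([], cntF t)).2 := by
  have h : (t ++ l).foldl aDel ([], 0) = l.foldl aDel (vecF t, cntF t) := by
    rw [List.foldl_append]; rfl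
  have h2 := aDel_pref l (vecF t) (cntF t)
  constructor
  · show ((t ++ l).foldl aDel ([], 0)).1 = _
    rw [h, h2]
  · show ((t ++ l).foldl aDel ([], 0)).2 = _
    rw [h, h2]

theorem pyGet?_concat_last {α : Type} (ss : List α) (t : α) :
    PySem.List.pyGet? (ss ++ [t]) (((ss ++ [t]).length : Int) - 1) = some t := by
  have h : (((ss ++ [t]).length : Int) - 1) = ((ss.length : Nat) : Int) := by
    simp
  rw [h, PySem.List.pyGet?_natCast]
  simp

theorem pyGet?_concat_neg_one {α : Type} (ss : List α) (t : α) :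
    PySem.List.pyGet? (ss ++ [t]) (-1) = some t := by
  simp [PySem.List.pyGet?, PySem.List.pyIdx?]

theorem pySetD_concat_last {α : Type} (ss : List α) (t v : α) :
    PySem.List.pySetD (ss ++ [t]) (((ss ++ [t]).length : Int) - 1) v = ss ++ [v] := by
  have h : (((ss ++ [t]).length : Int) - 1) = ((ss.length : Nat) : Int) := by
    simp
  rw [h, PySem.List.pySetD_natCast]
  simp

theorem pySetD_concat_neg_one {α : Type} (ss : List α) (t v : α) :
    PySem.List.pySetD (ss ++ [t]) (-1) v = ss ++ [v] := by
  simp [PySem.List.pySetD, PySem.List.pySet?, PySem.List.pyIdx?]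

theorem cntLast_concat (ss : List (List Char)) (t : List Char) :
    cntLast (ss ++ [t]) = cntF t := by
  simp [cntLast]

-- one line: B's step tracks A's step through `mirror`
theorem step_comm (raw : List Char) (seqs descs : List (List Char)) :
    bLineStep (mirror (some (seqs, descs, (seqs.length : Int) - 1))) raw =
      mirror (aFastaStep (some (seqs, descs, (seqs.length : Int) - 1)) raw) := by
  show bLineStep (some (descs, seqs.map alF, seqs.map vecF, cntLast seqs)) raw = _
  by_cases h1 : PySem.Chars.startswith (PySem.Chars.strip raw) ['>'] = true
  · simp [bLineStep, aFastaStep, h1, mirror, cntLast, vecF, cntF, alF]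
  · by_cases h2 : PySem.Chars.startswith (PySem.Chars.strip raw) ['#'] = true
    · simp [bLineStep, aFastaStep, h1, h2, mirror]
    · by_cases h3 : (PySem.Chars.strip raw).isEmpty = true
      · simp [bLineStep, aFastaStep, h1, h2, h3, mirror]
      · rcases List.eq_nil_or_concat seqs with rfl | ⟨ss, t, rfl⟩
        · simp [bLineStep, aFastaStep, h1, h2, h3, mirror, PySem.List.pyGet?,
            PySem.List.pyIdx?]
        · simp only [List.concat_eq_append]
          have hA := pyGet?_concat_last ss t
          have hAs := pySetD_concat_last ss t (t ++ PySem.Chars.strip raw)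
          simp only [bLineStep, aFastaStep, h1, h2, h3, Bool.false_or, if_neg,
            Bool.not_eq_true, hA, hAs, List.map_append, List.map_cons, List.map_nil,
            cntLast_concat, pyGet?_concat_neg_one, bChar_fuse]
          rw [pySetD_concat_neg_one, pySetD_concat_neg_one]
          have hv := vecF_cntF_append t (PySem.Chars.strip raw)
          simp [mirror, cntLast_concat, alF, List.filter_append, hv.1, hv.2]

theorem foldl_b_none (ls : List (List Char)) : ls.foldl bLineStep none = none := by
  induction ls with
  | nil => rfl
  | cons x ls ih => simpa [bLineStep] using ih

theorem foldl_a_none (ls : List (List Char)) : ls.foldl aFastaStep none = none := by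
  induction ls with
  | nil => rfl
  | cons x ls ih => simpa [aFastaStep] using ih

-- A's step keeps the invariant index = len(sequences) - 1
theorem aStep_shape (raw : List Char) (seqs descs : List (List Char)) :
    aFastaStep (some (seqs, descs, (seqs.length : Int) - 1)) raw = none ∨
      ∃ seqs' descs', aFastaStep (some (seqs, descs, (seqs.length : Int) - 1)) raw =
        some (seqs', descs', (seqs'.length : Int) - 1) := by
  by_cases h1 : PySem.Chars.startswith (PySem.Chars.strip raw) ['>'] = true
  · right
    refine ⟨seqs ++ [[]], descs ++ [PySem.List.slice (PySem.Chars.strip raw) (some 1) none], ?_⟩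
    simp [aFastaStep, h1]
  · by_cases h2 : PySem.Chars.startswith (PySem.Chars.strip raw) ['#'] = true
    · right; exact ⟨seqs, descs, by simp [aFastaStep, h1, h2]⟩
    · by_cases h3 : (PySem.Chars.strip raw).isEmpty = true
      · right; exact ⟨seqs, descs, by simp [aFastaStep, h1, h2, h3]⟩
      · cases hG : PySem.List.pyGet? seqs ((seqs.length : Int) - 1) with
        | none => left; simp [aFastaStep, h1, h2, h3, hG]
        | some s =>
          right
          refine ⟨PySem.List.pySetD seqs ((seqs.length : Int) - 1) (s ++ PySem.Chars.strip raw),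
            descs, ?_⟩
          simp [aFastaStep, h1, h2, h3, hG, PySem.List.length_pySetD]

theorem fold_comm (ls : List (List Char)) : ∀ (seqs descs : List (List Char)),
    ls.foldl bLineStep (mirror (some (seqs, descs, (seqs.length : Int) - 1))) =
      mirror (ls.foldl aFastaStep (some (seqs, descs, (seqs.length : Int) - 1))) := by
  induction ls with
  | nil => intro seqs descs; rfl
  | cons raw ls ih =>
    intro seqs descs
    rw [List.foldl_cons, List.foldl_cons, step_comm]
    rcases aStep_shape raw seqs descs with h | ⟨seqs', descs', h⟩
    · rw [h]; show ls.foldl bLineStep none = _; rw [foldl_b_none, foldl_a_none]; rfl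
    · rw [h]; exact ih seqs' descs'

-- ===== VERDICT (by name: the statement is the Claim_ definition above) =====
theorem parse_a3m_spec : Claim_equal_parse_a3m := by
  intro s _ _
  show parse_a3m s = parse_a3m_alt s
  unfold parse_a3m parse_a3m_alt parse_fasta_chars
  have h0 : (((([] : List (List Char))).length : Int) - 1) = -1 := by simp
  have hf := fold_comm (PySem.Chars.splitlines s.toList) [] []
  rw [h0] at hf
  have hm : mirror (some (([] : List (List Char)), ([] : List (List Char)), (-1 : Int))) =
      some ([], [], [], 0) := rfl
  rw [hm] at hf
  rw [hf]
  cases hA : (PySem.Chars.splitlines s.toList).foldl aFastaStep (some ([], [], (-1 : Int))) with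
  | none => rfl
  | some st =>
    obtain ⟨seqs, descs, idx⟩ := st
    show _ = ((seqs.map alF).map String.ofList, seqs.map vecF, descs.map String.ofList)
    simp [alF, vecF, PySem.Chars.islower]
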